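-- pv_equiv track=rewrite | github.com/saulspatz/maverick | scripts/test8665.py | hasStraight
-- ===== SOURCE A (Python) =====
-- from itertools import combinations
--
-- def hasStraight(spades, hearts, diamonds):
--     for s in combinations(spades, 3):
--         for h in combinations(hearts, 1):
--             for d in combinations(diamonds, 1):
--                 hand = s + h + d
--                 ranks = len(set(hand))
--                 if ranks != 5:
--                     continue
--                 if max(hand)-min(hand) == 4:
--                     return 1
--                 if sorted(hand) == [1,10,11,12,13]:
--                     return 1
--     return 0
-- ===== SOURCE B (Python) =====
-- def hasStraight(spades, hearts, diamonds):
--     ss = set(spades)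
--     hs = set(hearts)
--     ds = set(diamonds)
--
--     def ok(window):
--         # can window be covered by 3 spade ranks, 1 heart rank, 1 diamond rank?
--         for h in window:
--             if h in hs:
--                 for d in window:
--                     if d != h and d in ds:
--                         if all(r in ss for r in window if r != h and r != d):
--                             return True
--         return False
--
--     for low in ss | hs | ds:
--         if ok([low, low + 1, low + 2, low + 3, low + 4]):
--             return 1
--     if ok([1, 10, 11, 12, 13]):
--         return 1
--     return 0
-- ===== Notes on version B (the rewrite author's own statement) =====
-- stated objective: faster
-- what changed: Instead of enumerating all 3-spade/1-heart/1-diamond combinations, B builds one membership set per suit and enumerates candidate straights directly (each 5-window starting at a rank present in any suit, plus the ace-high wheel), checking per straight whether some heart rank and some distinct diamond rank cover it with the remaining three ranks among the spades.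
import Mathlib
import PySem

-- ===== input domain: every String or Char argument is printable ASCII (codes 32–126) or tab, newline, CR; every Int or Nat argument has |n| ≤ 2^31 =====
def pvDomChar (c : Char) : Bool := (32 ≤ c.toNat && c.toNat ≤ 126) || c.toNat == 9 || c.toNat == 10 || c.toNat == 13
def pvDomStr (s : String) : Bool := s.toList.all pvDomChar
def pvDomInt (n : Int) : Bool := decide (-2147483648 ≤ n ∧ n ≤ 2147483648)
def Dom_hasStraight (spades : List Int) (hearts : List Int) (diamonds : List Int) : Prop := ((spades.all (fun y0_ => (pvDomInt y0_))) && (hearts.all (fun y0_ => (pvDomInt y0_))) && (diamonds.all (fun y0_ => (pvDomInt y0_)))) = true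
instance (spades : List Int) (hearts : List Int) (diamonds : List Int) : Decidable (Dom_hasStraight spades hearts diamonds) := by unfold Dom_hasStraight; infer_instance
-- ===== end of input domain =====

-- B replaces A's enumeration of all 3-spade/1-heart/1-diamond combinations by a direct scan
-- over the candidate straights themselves (objective: faster; a timing run measures it).

-- ===== PORT A =====
-- body of A's innermost loop: hand = s + h + d, then A's three checks in order.
-- max(hand)/min(hand): Python would raise on an empty list; here hand always has 5
-- entries, so the `.getD 0` default of the Option-valued PySem max?/min? is never taken.
def pvCheckA (hand : List Int) : Bool :=
  let ranks := PySem.Set.len (PySem.Set.ofList hand)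
  if ranks ≠ 5 then false
  else if (PySem.List.max? hand (fun x => x)).getD 0 - (PySem.List.min? hand (fun x => x)).getD 0 = 4 then true
  else if PySem.List.sorted hand (fun x => x) false = [1, 10, 11, 12, 13] then true
  else false

def hasStraight (spades : List Int) (hearts : List Int) (diamonds : List Int) : Int :=
  if (PySem.List.combinations spades 3).any (fun s =>
      (PySem.List.combinations hearts 1).any (fun h =>
        (PySem.List.combinations diamonds 1).any (fun d =>
          pvCheckA ((s ++ h) ++ d)))) then 1
  else 0

-- ===== PORT B =====
-- Source B's `ok(window)`: some heart rank h and a distinct diamond rank d in the window,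
-- with every other rank of the window among the spade ranks.
def pvWindowOk (hs ds ss : PySem.Set Int) (window : List Int) : Bool :=
  window.any (fun h =>
    PySem.Set.contains hs h &&
      window.any (fun d =>
        decide (d ≠ h) && PySem.Set.contains ds d &&
          (window.filter (fun r => decide (r ≠ h) && decide (r ≠ d))).all
            (fun r => PySem.Set.contains ss r)))

-- Source B's chain of early `return 1`s: the window loop, then the ace-high wheel check.
def hasStraight_alt (spades : List Int) (hearts : List Int) (diamonds : List Int) : Int :=
  let ss := PySem.Set.ofList spades
  let hs := PySem.Set.ofList hearts
  let ds := PySem.Set.ofList diamonds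
  if (PySem.Set.union (PySem.Set.union ss hs) ds).any
        (fun low => pvWindowOk hs ds ss [low, low + 1, low + 2, low + 3, low + 4]) ||
      pvWindowOk hs ds ss [1, 10, 11, 12, 13] then 1
  else 0

-- ===== PRECONDITION & SPEC =====
def Spec_hasStraight (spades : List Int) (hearts : List Int) (diamonds : List Int) (out : Int) : Prop := out = hasStraight_alt spades hearts diamonds
instance (spades : List Int) (hearts : List Int) (diamonds : List Int) (out : Int) : Decidable (Spec_hasStraight spades hearts diamonds out) := by unfold Spec_hasStraight; infer_instance

-- ===== CLAIM (what is proved, stated in full; the proofs are below) =====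
def Claim_equal_hasStraight : Prop := ∀ (spades : List Int) (hearts : List Int) (diamonds : List Int), Dom_hasStraight spades hearts diamonds → Spec_hasStraight spades hearts diamonds (hasStraight spades hearts diamonds)

-- ===== LEMMAS AND PROOFS =====

-- T is the rank set of a straight: five consecutive ranks, or the ace-high wheel.
def pvStraightSet (T : Finset Int) : Prop :=
  (∃ l : Int, T = Finset.Icc l (l + 4)) ∨ T = ({1, 10, 11, 12, 13} : Finset Int)

-- the common semantic core both programs decide: some straight rank set T can be covered
-- by one heart rank, one distinct diamond rank, and spade ranks for the remaining three.
def pvGood (spades hearts diamonds : List Int) : Prop :=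
  ∃ T : Finset Int, pvStraightSet T ∧
    ∃ h ∈ T, h ∈ hearts ∧ ∃ d ∈ T, d ≠ h ∧ d ∈ diamonds ∧
      ∀ r ∈ T, r ≠ h → r ≠ d → r ∈ spades

lemma pv_len_ofList (xs : List Int) : PySem.Set.len (PySem.Set.ofList xs) = (xs.toFinset.card : Int) := by
  have hperm : (PySem.Set.ofList xs).Perm xs.dedup :=
    (List.perm_ext_iff_of_nodup (PySem.Set.nodup_ofList xs) xs.nodup_dedup).mpr
      (by intro a; simp [PySem.Set.mem_ofList, List.mem_dedup])
  simp [PySem.Set.len, hperm.length_eq, List.card_toFinset]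

lemma pv_card_straight {T : Finset Int} (h : pvStraightSet T) : T.card = 5 := by
  rcases h with ⟨l, rfl⟩ | rfl
  · rw [Int.card_Icc]; omega
  · decide

lemma pv_nodup_of_card (hand : List Int) (hlen : hand.length = 5)
    (hcard : hand.toFinset.card = 5) : hand.Nodup := by
  rw [List.card_toFinset] at hcard
  have := (List.dedup_sublist hand).eq_of_length (by omega)
  exact List.dedup_eq_self.mp this

lemma pvCheckA_iff (hand : List Int) (hlen : hand.length = 5) :
    pvCheckA hand = true ↔ hand.Nodup ∧ pvStraightSet hand.toFinset := by
  have hne : hand ≠ [] := by intro h; simp [h] at hlen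
  obtain ⟨M, hM⟩ : ∃ M, PySem.List.max? hand (fun x => x) = some M := by
    cases hmx : PySem.List.max? hand (fun x => x)
    · exact absurd ((PySem.List.max?_eq_none_iff _ _).mp hmx) hne
    · exact ⟨_, rfl⟩
  obtain ⟨m, hm⟩ : ∃ m, PySem.List.min? hand (fun x => x) = some m := by
    cases hmx : PySem.List.min? hand (fun x => x)
    · exact absurd ((PySem.List.min?_eq_none_iff _ _).mp hmx) hne
    · exact ⟨_, rfl⟩
  have hMmem : M ∈ hand := PySem.List.max?_mem hM
  have hmmem : m ∈ hand := PySem.List.min?_mem hm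
  have hMmax : ∀ y ∈ hand, y ≤ M := PySem.List.max?_isMax hM
  have hmmin : ∀ y ∈ hand, m ≤ y := PySem.List.min?_isMin hm
  constructor
  · intro hc
    simp only [pvCheckA, hM, hm, Option.getD_some] at hc
    split_ifs at hc with h1 h2 h3
    · rw [not_not] at h1
      have hcard : hand.toFinset.card = 5 := by
        have := pv_len_ofList hand; rw [h1] at this; omega
      have hnd := pv_nodup_of_card hand hlen hcard
      refine ⟨hnd, Or.inl ⟨m, ?_⟩⟩
      refine Finset.eq_of_subset_of_card_le ?_ (by rw [Int.card_Icc, hcard]; omega)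
      intro r hr
      rw [List.mem_toFinset] at hr
      rw [Finset.mem_Icc]
      exact ⟨hmmin r hr, by have := hMmax r hr; omega⟩
    · rw [not_not] at h1
      have hcard : hand.toFinset.card = 5 := by
        have := pv_len_ofList hand; rw [h1] at this; omega
      have hnd := pv_nodup_of_card hand hlen hcard
      have hperm : hand.Perm [1, 10, 11, 12, 13] := by
        have := PySem.List.sorted_perm (xs := hand) (key := fun x => x) (rev := false)
        rw [h3] at this; exact this.symm
      refine ⟨hnd, Or.inr ?_⟩
      ext a
      simp [List.mem_toFinset, hperm.mem_iff]
  · rintro ⟨hnd, hst⟩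
    have hcard : hand.toFinset.card = 5 := pv_card_straight hst
    have hlenS : PySem.Set.len (PySem.Set.ofList hand) = (5 : Int) := by
      rw [pv_len_ofList, hcard]; rfl
    simp only [pvCheckA, hM, hm, Option.getD_some, hlenS]
    rcases hst with ⟨l, hT⟩ | hT
    · have hMem : ∀ r, r ∈ hand ↔ (l ≤ r ∧ r ≤ l + 4) := by
        intro r
        rw [← List.mem_toFinset, hT, Finset.mem_Icc]
      have hMv : M = l + 4 := by
        have h1 := (hMem M).mp hMmem
        have h2 := hMmax (l + 4) ((hMem (l + 4)).mpr (by omega))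
        omega
      have hmv : m = l := by
        have h1 := (hMem m).mp hmmem
        have h2 := hmmin l ((hMem l).mpr (by omega))
        omega
      simp [hMv, hmv]
    · have hMem : ∀ r, r ∈ hand ↔ r ∈ ([1, 10, 11, 12, 13] : List Int) := by
        intro r
        rw [← List.mem_toFinset, hT]
        simp
      have hMv : M = 13 := by
        have h1 := (hMem M).mp hMmem
        have h2 := hMmax 13 ((hMem 13).mpr (by simp))
        simp at h1; omega
      have hmv : m = 1 := by
        have h1 := (hMem m).mp hmmem
        have h2 := hmmin 1 ((hMem 1).mpr (by simp))
        simp at h1; omega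
      have hsorted : PySem.List.sorted hand (fun x => x) false = [1, 10, 11, 12, 13] := by
        refine PySem.List.sorted_eq_of_perm_of_pairwise_lt hand [1, 10, 11, 12, 13] (fun x => x) ?_ (by decide)
        exact (List.perm_ext_iff_of_nodup (by decide) hnd).mpr (fun a => (hMem a).symm)
      simp [hMv, hmv, hsorted]

lemma pv_acond_iff (spades hearts diamonds : List Int) :
    ((PySem.List.combinations spades 3).any (fun s =>
      (PySem.List.combinations hearts 1).any (fun h =>
        (PySem.List.combinations diamonds 1).any (fun d =>
          pvCheckA ((s ++ h) ++ d)))) = true) ↔ pvGood spades hearts diamonds := by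
  simp only [List.any_eq_true, PySem.List.mem_combinations_iff]
  constructor
  · rintro ⟨s, ⟨hssub, hslen⟩, hl, ⟨hhsub, hhlen⟩, dl, ⟨hdsub, hdlen⟩, hc⟩
    obtain ⟨hv, rfl⟩ := List.length_eq_one_iff.mp hhlen
    obtain ⟨dv, rfl⟩ := List.length_eq_one_iff.mp hdlen
    have hhv : hv ∈ hearts := hhsub.subset (by simp)
    have hdv : dv ∈ diamonds := hdsub.subset (by simp)
    have hlen5 : ((s ++ [hv]) ++ [dv]).length = 5 := by simp [hslen]
    obtain ⟨hnd, hst⟩ := (pvCheckA_iff _ hlen5).mp hc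
    refine ⟨((s ++ [hv]) ++ [dv]).toFinset, hst, hv, by simp, hhv, dv, by simp, ?_, hdv, ?_⟩
    · simp [List.nodup_append] at hnd
      tauto
    · intro r hr hrh hrd
      rw [List.mem_toFinset] at hr
      simp only [List.mem_append, List.mem_singleton] at hr
      rcases hr with (hr | hr) | hr
      · exact hssub.subset hr
      · exact absurd hr hrh
      · exact absurd hr hrd
  · rintro ⟨T, hst, h, hhT, hh, d, hdT, hdh, hd, hcover⟩
    have hcard : T.card = 5 := pv_card_straight hst
    have hdT' : d ∈ T.erase h := Finset.mem_erase.mpr ⟨hdh, hdT⟩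
    have hRcard : ((T.erase h).erase d).card = 3 := by
      rw [Finset.card_erase_of_mem hdT', Finset.card_erase_of_mem hhT, hcard]
    obtain ⟨a, b, c, hab, hac, hbc, hR⟩ := Finset.card_eq_three.mp hRcard
    have hmemR : ∀ x, x ∈ (T.erase h).erase d ↔ (x ∈ T ∧ x ≠ h ∧ x ≠ d) := by
      intro x; simp [Finset.mem_erase]; tauto
    have hain : ∀ x, (x = a ∨ x = b ∨ x = c) → (x ∈ T ∧ x ≠ h ∧ x ≠ d) := by
      intro x hx
      refine (hmemR x).mp ?_
      rw [hR]; simp [hx]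
    have hsp : ∀ x, (x = a ∨ x = b ∨ x = c) → x ∈ spades := by
      intro x hx
      obtain ⟨hxT, hxh, hxd⟩ := hain x hx
      exact hcover x hxT hxh hxd
    set s0 := List.filter (fun x => decide (x = a ∨ x = b ∨ x = c)) spades.dedup with hs0
    have hs0sub : s0.Sublist spades := (List.filter_sublist).trans (List.dedup_sublist spades)
    have hs0nd : s0.Nodup := (List.nodup_dedup spades).filter _
    have hs0mem : ∀ x, x ∈ s0 ↔ (x = a ∨ x = b ∨ x = c) := by
      intro x
      simp only [hs0, List.mem_filter, List.mem_dedup, decide_eq_true_eq]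
      constructor
      · exact fun hx => hx.2
      · exact fun hx => ⟨hsp x hx, hx⟩
    have habcnd : ([a, b, c] : List Int).Nodup := by
      simp [hab, hac, hbc]
    have hperm : s0.Perm [a, b, c] :=
      (List.perm_ext_iff_of_nodup hs0nd habcnd).mpr (by intro x; simp [hs0mem x])
    have hs0len : s0.length = 3 := by rw [hperm.length_eq]; rfl
    have hlen5 : ((s0 ++ [h]) ++ [d]).length = 5 := by simp [hs0len]
    have hTf : ((s0 ++ [h]) ++ [d]).toFinset = T := by
      ext r
      simp only [List.mem_toFinset, List.mem_append, List.mem_singleton, hs0mem r]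
      constructor
      · rintro ((hr | hr) | hr)
        · exact (hain r hr).1
        · exact hr ▸ hhT
        · exact hr ▸ hdT
      · intro hrT
        by_cases hrh : r = h
        · exact Or.inl (Or.inr hrh)
        by_cases hrd : r = d
        · exact Or.inr hrd
        have : r ∈ (T.erase h).erase d := (hmemR r).mpr ⟨hrT, hrh, hrd⟩
        rw [hR] at this
        simp at this
        exact Or.inl (Or.inl this)
    have hnd : ((s0 ++ [h]) ++ [d]).Nodup :=
      pv_nodup_of_card _ hlen5 (by rw [hTf]; exact hcard)
    have hck : pvCheckA ((s0 ++ [h]) ++ [d]) = true :=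
      (pvCheckA_iff _ hlen5).mpr ⟨hnd, by rw [hTf]; exact hst⟩
    exact ⟨s0, ⟨hs0sub, hs0len⟩, [h], ⟨List.singleton_sublist.mpr hh, rfl⟩,
      [d], ⟨List.singleton_sublist.mpr hd, rfl⟩, hck⟩

lemma pvWindowOk_iff (spades hearts diamonds : List Int) (w : List Int) :
    pvWindowOk (PySem.Set.ofList hearts) (PySem.Set.ofList diamonds) (PySem.Set.ofList spades) w = true ↔
      ∃ h ∈ w, h ∈ hearts ∧ ∃ d ∈ w, d ≠ h ∧ d ∈ diamonds ∧
        ∀ r ∈ w, r ≠ h → r ≠ d → r ∈ spades := by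
  simp only [pvWindowOk, List.any_eq_true, List.all_eq_true, List.mem_filter,
    Bool.and_eq_true, decide_eq_true_eq, PySem.Set.contains_iff, PySem.Set.mem_ofList]
  constructor
  · rintro ⟨h, hhw, hh, d, hdw, ⟨hdh, hd⟩, hall⟩
    exact ⟨h, hhw, hh, d, hdw, hdh, hd, fun r hrw hrh hrd => hall r ⟨hrw, hrh, hrd⟩⟩
  · rintro ⟨h, hhw, hh, d, hdw, hdh, hd, hall⟩
    exact ⟨h, hhw, hh, d, hdw, ⟨hdh, hd⟩, fun r hr => hall r hr.1 hr.2.1 hr.2.2⟩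

lemma pv_bcond_iff (spades hearts diamonds : List Int) :
    ((PySem.Set.union (PySem.Set.union (PySem.Set.ofList spades) (PySem.Set.ofList hearts)) (PySem.Set.ofList diamonds)).any
        (fun low => pvWindowOk (PySem.Set.ofList hearts) (PySem.Set.ofList diamonds) (PySem.Set.ofList spades)
          [low, low + 1, low + 2, low + 3, low + 4]) ||
      pvWindowOk (PySem.Set.ofList hearts) (PySem.Set.ofList diamonds) (PySem.Set.ofList spades)
        [1, 10, 11, 12, 13]) = true ↔ pvGood spades hearts diamonds := by
  have hwin : ∀ (l r : Int), r ∈ ([l, l + 1, l + 2, l + 3, l + 4] : List Int) ↔ r ∈ Finset.Icc l (l + 4) := by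
    intro l r; simp [Finset.mem_Icc]; omega
  have hwheel : ∀ r : Int, r ∈ ([1, 10, 11, 12, 13] : List Int) ↔ r ∈ ({1, 10, 11, 12, 13} : Finset Int) := by
    intro r; simp
  rw [Bool.or_eq_true, List.any_eq_true]
  constructor
  · rintro (⟨low, _, hok⟩ | hok)
    · obtain ⟨h, hhw, hh, d, hdw, hdh, hd, hall⟩ := (pvWindowOk_iff _ _ _ _).mp hok
      exact ⟨Finset.Icc low (low + 4), Or.inl ⟨low, rfl⟩, h, (hwin low h).mp hhw, hh,
        d, (hwin low d).mp hdw, hdh, hd,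
        fun r hr hrh hrd => hall r ((hwin low r).mpr hr) hrh hrd⟩
    · obtain ⟨h, hhw, hh, d, hdw, hdh, hd, hall⟩ := (pvWindowOk_iff _ _ _ _).mp hok
      exact ⟨{1, 10, 11, 12, 13}, Or.inr rfl, h, (hwheel h).mp hhw, hh,
        d, (hwheel d).mp hdw, hdh, hd,
        fun r hr hrh hrd => hall r ((hwheel r).mpr hr) hrh hrd⟩
  · rintro ⟨T, hst, h, hhT, hh, d, hdT, hdh, hd, hcover⟩
    rcases hst with ⟨l, rfl⟩ | rfl
    · refine Or.inl ⟨l, ?_, ?_⟩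
      · have hlT : l ∈ Finset.Icc l (l + 4) := by simp [Finset.mem_Icc]
        have : l ∈ spades ∨ l ∈ hearts ∨ l ∈ diamonds := by
          by_cases hlh : l = h
          · exact Or.inr (Or.inl (hlh ▸ hh))
          by_cases hld : l = d
          · exact Or.inr (Or.inr (hld ▸ hd))
          · exact Or.inl (hcover l hlT hlh hld)
        simp only [PySem.Set.mem_union, PySem.Set.mem_ofList]
        tauto
      · exact (pvWindowOk_iff _ _ _ _).mpr ⟨h, (hwin l h).mpr hhT, hh,
          d, (hwin l d).mpr hdT, hdh, hd,
          fun r hr hrh hrd => hcover r ((hwin l r).mp hr) hrh hrd⟩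
    · exact Or.inr ((pvWindowOk_iff _ _ _ _).mpr ⟨h, (hwheel h).mpr hhT, hh,
        d, (hwheel d).mpr hdT, hdh, hd,
        fun r hr hrh hrd => hcover r ((hwheel r).mp hr) hrh hrd⟩)

-- ===== VERDICT (by name: the statement is the Claim_ definition above) =====
theorem hasStraight_spec : Claim_equal_hasStraight := by
  intro spades hearts diamonds _
  unfold Spec_hasStraight
  simp only [hasStraight, hasStraight_alt]
  by_cases hG : pvGood spades hearts diamonds
  · rw [if_pos ((pv_acond_iff spades hearts diamonds).mpr hG),
      if_pos ((pv_bcond_iff spades hearts diamonds).mpr hG)]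
  · rw [if_neg (fun hc => hG ((pv_acond_iff spades hearts diamonds).mp hc)),
      if_neg (fun hc => hG ((pv_bcond_iff spades hearts diamonds).mp hc))]
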